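-- pv_equiv track=rewrite | github.com/Vyngard/leetcode-solutions | Solutions/2191- Sort the Jumbled Numbers/Solution.py | sortJumbled
-- ===== SOURCE A (Python) =====
-- from typing import List
--
-- def sortJumbled(mapping: List[int], nums: List[int]) -> List[int]:
--     my_dict = dict()
--     for num in nums:
--         mapped_value = 0
--         index = 1
--         temp = num
--         while True:
--             digit = temp % 10
--             mapped_value += mapping[digit] * index
--             temp //= 10
--             index *= 10
--             if temp == 0:
--                 break
--         my_dict[num] = mapped_value
--
--     return sorted(nums, key= lambda n: my_dict[n])
-- ===== SOURCE B (Python) =====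
-- from typing import List
--
-- def sortJumbled(mapping: List[int], nums: List[int]) -> List[int]:
--     def mapped(n: int) -> int:
--         if n < 10:
--             return mapping[n]
--         return mapped(n // 10) * 10 + mapping[n % 10]
--     return sorted(nums, key=mapped)
-- ===== Notes on version B (the rewrite author's own statement) =====
-- stated objective: simpler
-- what changed: B drops A's precomputed dict and least-significant-digit power-of-ten accumulation, computing each sort key inline by a most-significant-first recursive Horner evaluation (key(n) = key(n//10)*10 + mapping[n%10]).
import Mathlib
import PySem

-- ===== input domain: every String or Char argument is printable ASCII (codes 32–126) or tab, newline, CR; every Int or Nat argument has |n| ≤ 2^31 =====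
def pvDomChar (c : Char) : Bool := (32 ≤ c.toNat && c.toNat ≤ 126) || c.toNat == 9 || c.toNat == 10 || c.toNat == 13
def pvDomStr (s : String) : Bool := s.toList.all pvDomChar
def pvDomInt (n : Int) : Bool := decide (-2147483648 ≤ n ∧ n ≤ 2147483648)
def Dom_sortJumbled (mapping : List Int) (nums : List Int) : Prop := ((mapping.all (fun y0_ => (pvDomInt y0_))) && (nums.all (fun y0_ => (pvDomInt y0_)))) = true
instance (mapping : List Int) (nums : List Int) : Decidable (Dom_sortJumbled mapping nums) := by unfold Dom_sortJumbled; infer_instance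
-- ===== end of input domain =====

-- B replaces A's precomputed dict and least-significant-first power-of-ten accumulation by an
-- inline most-significant-first recursive Horner evaluation of the mapped key (objective: simpler).

-- ===== PORT A =====
-- A's 'while True' digit loop; fuel only makes the recursion total (Python diverges on negative
-- num, excluded by Pre_); mapping[digit] is pyGet? with default 0 (IndexError excluded by Pre_).
def sortJumbledLoop (mapping : List Int) (fuel : Nat) (temp mapped index : Int) : Int :=
  match fuel with
  | 0 => mapped
  | fuel + 1 =>
    let digit := PySem.Int.mod temp 10
    let mapped := mapped + (PySem.List.pyGet? mapping digit).getD 0 * index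
    let temp := PySem.Int.floordiv temp 10
    if temp = 0 then mapped else sortJumbledLoop mapping fuel temp mapped (index * 10)

def sortJumbled (mapping : List Int) (nums : List Int) : List Int :=
  let myDict : PySem.Dict Int Int :=
    nums.foldl (fun d num => d.insert num (sortJumbledLoop mapping (num.toNat + 1) num 0 1))
      PySem.Dict.empty
  PySem.List.sorted nums (fun n => myDict.getD n 0) false

-- ===== PORT B =====
-- B's recursive Horner key; mapping[i] is pyGet? with default 0 (IndexError excluded by Pre_).
def sortJumbledKey (mapping : List Int) (n : Int) : Int :=
  if h : n < 10 then (PySem.List.pyGet? mapping n).getD 0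
  else sortJumbledKey mapping (PySem.Int.floordiv n 10) * 10 +
       (PySem.List.pyGet? mapping (PySem.Int.mod n 10)).getD 0
termination_by n.toNat
decreasing_by
  simp only [not_lt] at h
  rw [PySem.Int.floordiv_eq_ediv_of_pos (by norm_num)]
  omega

def sortJumbled_alt (mapping : List Int) (nums : List Int) : List Int :=
  PySem.List.sorted nums (fun n => sortJumbledKey mapping n) false

-- ===== PRECONDITION & SPEC =====
-- Pre_: exactly the inputs on which Python A returns: every num is nonnegative (A's digit loop
-- diverges on negatives), mapping is nonempty (num = 0 reads mapping[0]) and every decimal digit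
-- of every num indexes inside mapping (else IndexError).
def Pre_sortJumbled (mapping : List Int) (nums : List Int) : Prop :=
  ∀ n ∈ nums, 0 ≤ n ∧ 0 < mapping.length ∧ ∀ d ∈ Nat.digits 10 n.toNat, d < mapping.length
instance (mapping : List Int) (nums : List Int) : Decidable (Pre_sortJumbled mapping nums) := by
  unfold Pre_sortJumbled; infer_instance

def pvWitness_sortJumbled : List Int × List Int :=
  ([8, 9, 4, 0, 2, 1, 3, 5, 7, 6], [991, 338, 38])

def Spec_sortJumbled (mapping : List Int) (nums : List Int) (out : List Int) : Prop := out = sortJumbled_alt mapping nums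
instance (mapping : List Int) (nums : List Int) (out : List Int) : Decidable (Spec_sortJumbled mapping nums out) := by unfold Spec_sortJumbled; infer_instance

-- ===== CLAIM (what is proved, stated in full; the proofs are below) =====
def Claim_equal_sortJumbled : Prop := ∀ (mapping : List Int) (nums : List Int), Dom_sortJumbled mapping nums → Pre_sortJumbled mapping nums → Spec_sortJumbled mapping nums (sortJumbled mapping nums)

-- ===== LEMMAS AND PROOFS =====

-- A's digit loop computes (with enough fuel) exactly B's Horner key, positionally weighted.
theorem sortJumbledLoop_eq_key (mapping : List Int) :
    ∀ fuel (temp m index : Int), 0 ≤ temp → temp.toNat ≤ fuel →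
      sortJumbledLoop mapping (fuel + 1) temp m index =
        m + sortJumbledKey mapping temp * index := by
  intro fuel
  induction fuel using Nat.strong_induction_on with
  | _ fuel ih =>
    intro temp m index h0 hfuel
    rw [sortJumbledLoop]
    have h10 : (0:Int) < 10 := by norm_num
    rw [PySem.Int.mod_eq_emod_of_pos h10, PySem.Int.floordiv_eq_ediv_of_pos h10]
    by_cases hsmall : temp < 10
    · have hdiv : temp / 10 = 0 := Int.ediv_eq_zero_of_lt h0 hsmall
      have hmod : temp % 10 = temp := Int.emod_eq_of_lt h0 hsmall
      rw [sortJumbledKey]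
      simp [hdiv, hmod, hsmall]
    · simp only [not_lt] at hsmall
      have hdivpos : 0 < temp / 10 := by
        have := Int.le_ediv_iff_mul_le h10 (a := temp) (b := 1)
        omega
      have hdivne : ¬ temp / 10 = 0 := by omega
      have hlt : (temp / 10).toNat < temp.toNat := by omega
      obtain ⟨fuel', rfl⟩ : ∃ f, fuel = f + 1 := ⟨fuel - 1, by omega⟩
      have hf' : (temp / 10).toNat ≤ fuel' := by omega
      rw [if_neg hdivne,
        ih fuel' (by omega) (temp / 10) _ (index * 10) (by omega) hf']
      conv_rhs => rw [sortJumbledKey]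
      rw [dif_neg (show ¬ temp < 10 by omega), PySem.Int.mod_eq_emod_of_pos h10,
        PySem.Int.floordiv_eq_ediv_of_pos h10]
      ring

-- After A's first pass, the dict maps each num of the list to its loop value.
theorem sortJumbled_dict_getD (f : Int → Int) :
    ∀ (l : List Int) (d : PySem.Dict Int Int) (n : Int),
      (l.foldl (fun d num => d.insert num (f num)) d).getD n 0 =
        if n ∈ l then f n else d.getD n 0 := by
  intro l
  induction l with
  | nil => intro d n; simp
  | cons x t ihl =>
    intro d n
    simp only [List.foldl_cons]
    rw [ihl]
    rw [PySem.Dict.getD_insert]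
    by_cases ht : n ∈ t <;> by_cases hx : n = x <;>
      simp [ht, hx, List.mem_cons]

-- insertBy only compares the inserted element with elements of the list.
theorem sortJumbled_insertBy_congr (b1 b2 : Int → Int → Bool) (x : Int) :
    ∀ ys : List Int, (∀ y ∈ ys, b1 x y = b2 x y) →
      PySem.List.insertBy b1 x ys = PySem.List.insertBy b2 x ys := by
  intro ys
  induction ys with
  | nil => intro _; rfl
  | cons y t ih =>
    intro h
    simp only [PySem.List.insertBy]
    rw [h y List.mem_cons_self]
    cases b2 x y with
    | true => rfl
    | false => simp [ih fun z hz => h z (List.mem_cons_of_mem _ hz)]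

-- sorted is insensitive to changing the key outside the list (congruence on members).
theorem sortJumbled_sorted_congr (xs : List Int) (k1 k2 : Int → Int)
    (h : ∀ x ∈ xs, k1 x = k2 x) :
    PySem.List.sorted xs k1 false = PySem.List.sorted xs k2 false := by
  rw [PySem.List.sorted_eq_foldl_insertBy, PySem.List.sorted_eq_foldl_insertBy]
  suffices haux : ∀ (l acc : List Int), (∀ x ∈ l, k1 x = k2 x) → (∀ y ∈ acc, k1 y = k2 y) →
      l.foldl (fun acc x => PySem.List.insertBy (fun a b => decide (k1 a < k1 b)) x acc) acc =
      l.foldl (fun acc x => PySem.List.insertBy (fun a b => decide (k2 a < k2 b)) x acc) acc by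
    exact haux xs [] h (by simp)
  intro l
  induction l with
  | nil => intro acc _ _; rfl
  | cons x t ih =>
    intro acc hl hacc
    simp only [List.foldl_cons]
    have hx : k1 x = k2 x := hl x List.mem_cons_self
    rw [sortJumbled_insertBy_congr _ _ x acc
      (fun y hy => by rw [hx, hacc y hy])]
    exact ih _ (fun z hz => hl z (List.mem_cons_of_mem _ hz))
      (fun y hy => by
        rcases (PySem.List.mem_insertBy _ _ _ _).mp hy with rfl | hy'
        · exact hx
        · exact hacc y hy')

-- ===== VERDICT (by name: the statement is the Claim_ definition above) =====
theorem sortJumbled_spec : Claim_equal_sortJumbled := by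
  intro mapping nums _ hpre
  unfold Spec_sortJumbled sortJumbled sortJumbled_alt
  apply sortJumbled_sorted_congr
  intro n hn
  rw [sortJumbled_dict_getD, if_pos hn,
    sortJumbledLoop_eq_key mapping n.toNat n 0 1 (hpre n hn).1 le_rfl]
  ring
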